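-- pv_equiv track=rewrite | github.com/utopia-group/graphy | lib/falx/utils/table_utils.py | table_subset_eq
-- ===== SOURCE A (Python) =====
-- def table_subset_eq(table1, table2):
-- 	"""check whether table1 is subsumed by table2 """
-- 	if len(table1) == 0: return True
-- 	if len(table2) == 0: return False
--
-- 	schema1 = tuple(sorted(table1[0].keys()))
-- 	schema2 = tuple(sorted(table2[0].keys()))
-- 	if schema1 != schema2: return False
--
-- 	frozen_table1 = [tuple([t[key] for key in schema1]) for t in table1]
-- 	frozen_table2 = [tuple([t[key] for key in schema1]) for t in table2]
--
-- 	for t in frozen_table1: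
-- 		cnt1 = len([r for r in frozen_table1 if r == t])
-- 		cnt2 = len([r for r in frozen_table2 if r == t])
-- 		if cnt2 < cnt1:
-- 			return False
-- 	return True
-- ===== SOURCE B (Python) =====
-- def table_subset_eq(table1, table2):
-- 	"""check whether table1 is subsumed by table2 """
-- 	if len(table1) == 0: return True
-- 	if len(table2) == 0: return False
--
-- 	schema1 = tuple(sorted(table1[0].keys()))
-- 	schema2 = tuple(sorted(table2[0].keys()))
-- 	if schema1 != schema2: return False
--
-- 	pool = [tuple(t[key] for key in schema1) for t in table2]
-- 	for t in table1:
-- 		row = tuple(t[key] for key in schema1)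
-- 		try:
-- 			pool.remove(row)
-- 		except ValueError:
-- 			return False
-- 	return True
-- ===== Notes on version B (the rewrite author's own statement) =====
-- stated objective: alternative
-- what changed: Replaces A's per-row recount against both whole tables (two filters per row) by a single pass that greedily consumes each table1 row from a shrinking copy of table2's rows.
import Mathlib
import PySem

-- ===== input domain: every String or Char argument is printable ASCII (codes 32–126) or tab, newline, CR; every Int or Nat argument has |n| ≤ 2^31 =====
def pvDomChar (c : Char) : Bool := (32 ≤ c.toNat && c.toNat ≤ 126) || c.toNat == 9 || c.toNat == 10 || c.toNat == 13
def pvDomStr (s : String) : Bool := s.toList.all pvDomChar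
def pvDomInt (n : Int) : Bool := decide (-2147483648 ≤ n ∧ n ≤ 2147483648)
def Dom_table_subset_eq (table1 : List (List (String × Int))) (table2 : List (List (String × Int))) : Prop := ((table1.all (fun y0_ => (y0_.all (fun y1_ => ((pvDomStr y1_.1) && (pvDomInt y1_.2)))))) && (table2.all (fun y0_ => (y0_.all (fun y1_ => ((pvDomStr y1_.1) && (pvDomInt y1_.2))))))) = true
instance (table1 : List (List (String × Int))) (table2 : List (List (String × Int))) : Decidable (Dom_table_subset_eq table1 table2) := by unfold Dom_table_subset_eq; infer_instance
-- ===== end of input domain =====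

-- B keeps A's guards, schema check and row-freezing, but replaces A's per-row recount against
-- both whole tables by a single pass consuming each table1 row from a shrinking copy of table2's
-- rows (objective: alternative). Equivalence is about the return value on Pre_ (where no KeyError occurs).

-- ===== PORT A =====
-- sorted(t.keys()) for a row given as an association list (dict: last duplicate key wins, as Dict.ofList)
def pvSchema (t : List (String × Int)) : List String :=
  PySem.List.sorted (PySem.Dict.keys (PySem.Dict.ofList t)) (fun k => k) false

-- tuple([t[key] for key in schema]); under Pre_ every key is present, so the getD default is never used
def pvFreeze (schema : List String) (t : List (String × Int)) : List Int :=
  schema.map (fun k => (PySem.Dict.get? (PySem.Dict.ofList t) k).getD 0)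

def table_subset_eq (table1 : List (List (String × Int))) (table2 : List (List (String × Int))) : Bool :=
  if table1.length == 0 then true
  else if table2.length == 0 then false
  else
    let schema1 := pvSchema ((PySem.List.pyGet? table1 0).getD [])
    let schema2 := pvSchema ((PySem.List.pyGet? table2 0).getD [])
    if schema1 ≠ schema2 then false
    else
      let frozen1 := table1.map (pvFreeze schema1)
      let frozen2 := table2.map (pvFreeze schema1)
      -- for t in frozen1: if cnt2 < cnt1: return False — a short-circuiting all
      frozen1.all (fun t =>
        let cnt1 := (frozen1.filter (fun r => r == t)).length
        let cnt2 := (frozen2.filter (fun r => r == t)).length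
        if cnt2 < cnt1 then false else true)

-- ===== PORT B =====
-- for t in table1: pool.remove(freeze(t)) / except ValueError: return False
def pvConsume (schema : List String) (rows : List (List (String × Int))) (pool : List (List Int)) : Bool :=
  match rows with
  | [] => true
  | t :: rest =>
    match PySem.List.remove? pool (pvFreeze schema t) with
    | some pool' => pvConsume schema rest pool'
    | none => false

def table_subset_eq_alt (table1 : List (List (String × Int))) (table2 : List (List (String × Int))) : Bool :=
  if table1.length == 0 then true
  else if table2.length == 0 then false
  else
    let schema1 := pvSchema ((PySem.List.pyGet? table1 0).getD [])
    let schema2 := pvSchema ((PySem.List.pyGet? table2 0).getD [])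
    if schema1 ≠ schema2 then false
    else
      pvConsume schema1 table1 (table2.map (pvFreeze schema1))

-- ===== PRECONDITION & SPEC =====
-- Pre_ excludes exactly the inputs where A raises KeyError: both tables nonempty with equal
-- sorted first-row schemas, but some row of either table lacks a key of that schema.
def Pre_table_subset_eq (table1 : List (List (String × Int))) (table2 : List (List (String × Int))) : Prop :=
  table1 ≠ [] → table2 ≠ [] →
  pvSchema ((PySem.List.pyGet? table1 0).getD []) = pvSchema ((PySem.List.pyGet? table2 0).getD []) →
  ∀ row ∈ table1 ++ table2, ∀ k ∈ pvSchema ((PySem.List.pyGet? table1 0).getD []),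
    PySem.Dict.contains (PySem.Dict.ofList row) k = true
instance (table1 : List (List (String × Int))) (table2 : List (List (String × Int))) : Decidable (Pre_table_subset_eq table1 table2) := by unfold Pre_table_subset_eq; infer_instance

def pvWitness_table_subset_eq : (List (List (String × Int))) × (List (List (String × Int))) :=
  ([[("a", 1)], [("a", 2)]], [[("a", 2)], [("a", 1)], [("a", 1)]])

def Spec_table_subset_eq (table1 : List (List (String × Int))) (table2 : List (List (String × Int))) (out : Bool) : Prop := out = table_subset_eq_alt table1 table2
instance (table1 : List (List (String × Int))) (table2 : List (List (String × Int))) (out : Bool) : Decidable (Spec_table_subset_eq table1 table2 out) := by unfold Spec_table_subset_eq; infer_instance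

-- ===== CLAIM (what is proved, stated in full; the proofs are below) =====
def Claim_equal_table_subset_eq : Prop := ∀ (table1 : List (List (String × Int))) (table2 : List (List (String × Int))), Dom_table_subset_eq table1 table2 → Pre_table_subset_eq table1 table2 → Spec_table_subset_eq table1 table2 (table_subset_eq table1 table2)

-- ===== LEMMAS AND PROOFS =====

-- greedy consumption succeeds iff rows (frozen) are a sub-multiset of the pool
lemma pvConsume_eq_true_iff (schema : List String) (rows : List (List (String × Int))) (pool : List (List Int)) :
    pvConsume schema rows pool = true ↔ List.Subperm (rows.map (pvFreeze schema)) pool := by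
  induction rows generalizing pool with
  | nil => simp [pvConsume, List.nil_subperm]
  | cons t rest ih =>
    rcases hm : PySem.List.remove? pool (pvFreeze schema t) with _ | pool'
    · have hnm : pvFreeze schema t ∉ pool := (PySem.List.remove?_eq_none_iff _ _).mp hm
      simp only [pvConsume, hm, List.map_cons]
      constructor
      · intro h; cases h
      · intro h
        exact absurd (h.subset (List.mem_cons_self ..)) hnm
    · have hmem : pvFreeze schema t ∈ pool := by
        by_contra hn
        rw [(PySem.List.remove?_eq_none_iff _ _).mpr hn] at hm
        cases hm
      have herase : pool' = pool.erase (pvFreeze schema t) := by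
        have := PySem.List.remove?_eq_some_erase (v := pvFreeze schema t) (xs := pool) hmem
        rw [hm] at this; exact Option.some_inj.mp this
      subst herase
      simp only [pvConsume, hm, List.map_cons]
      rw [ih]
      have hp : List.Perm pool (pvFreeze schema t :: pool.erase (pvFreeze schema t)) :=
        List.perm_cons_erase hmem
      rw [show ((pvFreeze schema t :: List.map (pvFreeze schema) rest).Subperm pool ↔
            (pvFreeze schema t :: List.map (pvFreeze schema) rest).Subperm
              (pvFreeze schema t :: pool.erase (pvFreeze schema t))) from hp.subperm_left,
          List.subperm_cons]

-- A's counting loop decides exactly the same sub-multiset relation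
lemma all_counts_eq_true_iff (l1 l2 : List (List Int)) :
    (l1.all (fun t =>
      if (l2.filter (fun r => r == t)).length < (l1.filter (fun r => r == t)).length
      then false else true)) = true ↔ List.Subperm l1 l2 := by
  rw [List.subperm_ext_iff, List.all_eq_true]
  constructor
  · intro h x hx
    have := h x hx
    rw [List.count_eq_length_filter, List.count_eq_length_filter]
    split at this
    · cases this
    · omega
  · intro h x hx
    have := h x hx
    rw [List.count_eq_length_filter, List.count_eq_length_filter] at this
    split
    · omega
    · rfl

lemma core_eq (schema : List String) (t1 t2 : List (List (String × Int))) :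
    (let frozen1 := t1.map (pvFreeze schema)
     let frozen2 := t2.map (pvFreeze schema)
     frozen1.all (fun t =>
       if (frozen2.filter (fun r => r == t)).length < (frozen1.filter (fun r => r == t)).length
       then false else true))
    = pvConsume schema t1 (t2.map (pvFreeze schema)) := by
  simp only
  rcases h : pvConsume schema t1 (t2.map (pvFreeze schema)) with _ | _
  · rw [← Bool.not_eq_true, all_counts_eq_true_iff, ← pvConsume_eq_true_iff schema t1, h]
    simp
  · rw [all_counts_eq_true_iff, ← pvConsume_eq_true_iff schema t1, h]

-- ===== VERDICT (by name: the statement is the Claim_ definition above) =====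
theorem table_subset_eq_spec : Claim_equal_table_subset_eq := by
  intro table1 table2 _ _
  unfold Spec_table_subset_eq table_subset_eq table_subset_eq_alt
  split
  · rfl
  · split
    · rfl
    · dsimp only
      split
      · rfl
      · exact core_eq _ table1 table2
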